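-- pv_equiv track=rewrite | github.com/cedricmoeller/ELwithOOKGDetectionClustering | src/utilities/get_dataset_clustering_stats.py | sum_according_to_range
-- ===== SOURCE A (Python) =====
-- import copy
--
-- def sum_according_to_range(in_dict: dict, start: int, end: int = None):
--     sum_ = 0
--     if end is None:
--         in_dict = copy.deepcopy(in_dict)
--         for i in range(0, start):
--             if i in in_dict:
--                 del(in_dict[i])
--         for value in in_dict.values():
--             sum_ += value
--     else:
--         for i in range(start, end):
--             if i in in_dict:
--                 sum_ += in_dict[i]
--     return sum_
-- ===== SOURCE B (Python) =====
-- def sum_according_to_range(in_dict: dict, start: int, end: int = None):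
--     if end is None:
--         total = sum(in_dict.values())
--         removed = sum(v for k, v in in_dict.items() if 0 <= k < start)
--         return total - removed
--     return sum(v for k, v in in_dict.items() if start <= k < end)
-- ===== Notes on version B (the rewrite author's own statement) =====
-- stated objective: alternative
-- what changed: Both branches are replaced by direct sums over the dict's items filtered on the key range: the end=None branch computes sum(values) minus the sum of values with key in [0,start) (complement subtraction, no deepcopy/deletion), and the end-given branch sums items with key in [start,end) instead of probing every integer of range(start,end).
import Mathlib
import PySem

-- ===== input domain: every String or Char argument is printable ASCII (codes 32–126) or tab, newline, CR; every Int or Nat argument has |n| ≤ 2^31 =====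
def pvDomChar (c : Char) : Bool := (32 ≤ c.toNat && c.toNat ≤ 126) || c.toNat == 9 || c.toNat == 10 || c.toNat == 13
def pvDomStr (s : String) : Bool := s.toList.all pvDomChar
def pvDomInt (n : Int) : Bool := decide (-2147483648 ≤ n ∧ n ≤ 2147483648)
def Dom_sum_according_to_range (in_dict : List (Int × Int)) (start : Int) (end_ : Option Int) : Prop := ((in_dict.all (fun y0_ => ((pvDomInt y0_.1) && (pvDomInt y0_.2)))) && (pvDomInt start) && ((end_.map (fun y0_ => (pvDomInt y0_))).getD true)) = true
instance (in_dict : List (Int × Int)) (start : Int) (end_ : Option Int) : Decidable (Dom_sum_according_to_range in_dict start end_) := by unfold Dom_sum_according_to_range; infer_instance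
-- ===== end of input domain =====

-- B replaces A's deepcopy-and-delete (resp. integer-range probing) by direct sums over the
-- dict's items filtered on the key range (complement subtraction for the open-ended branch);
-- objective: alternative decomposition, no mutation/copy.

-- ===== PORT A =====
def sum_according_to_range (in_dict : List (Int × Int)) (start : Int) (end_ : Option Int) : Int :=
  match end_ with
  | none =>
    -- in_dict = copy.deepcopy(in_dict); for i in range(0, start): if i in in_dict: del in_dict[i]
    let d := (PySem.List.pyRange 0 start 1).foldl
      (fun d i => if d.contains i then d.erase i else d) (PySem.Dict.ofList in_dict)
    -- for value in in_dict.values(): sum_ += value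
    d.values.foldl (fun s v => s + v) 0
  | some e =>
    -- for i in range(start, end): if i in in_dict: sum_ += in_dict[i]
    let d := PySem.Dict.ofList in_dict
    (PySem.List.pyRange start e 1).foldl
      (fun s i => if d.contains i then s + d.getD i 0 else s) 0

-- ===== PORT B =====
def sum_according_to_range_alt (in_dict : List (Int × Int)) (start : Int) (end_ : Option Int) : Int :=
  let d := PySem.Dict.ofList in_dict
  match end_ with
  | none =>
    let total := d.values.sum
    let removed := ((d.items.filter (fun p => decide (0 ≤ p.1) && decide (p.1 < start))).map Prod.snd).sum
    total - removed
  | some e =>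
    ((d.items.filter (fun p => decide (start ≤ p.1) && decide (p.1 < e))).map Prod.snd).sum

-- ===== PRECONDITION & SPEC =====
def Spec_sum_according_to_range (in_dict : List (Int × Int)) (start : Int) (end_ : Option Int) (out : Int) : Prop := out = sum_according_to_range_alt in_dict start end_
instance (in_dict : List (Int × Int)) (start : Int) (end_ : Option Int) (out : Int) : Decidable (Spec_sum_according_to_range in_dict start end_ out) := by unfold Spec_sum_according_to_range; infer_instance

-- ===== CLAIM (what is proved, stated in full; the proofs are below) =====
def Claim_equal_sum_according_to_range : Prop := ∀ (in_dict : List (Int × Int)) (start : Int) (end_ : Option Int), Dom_sum_according_to_range in_dict start end_ → Spec_sum_according_to_range in_dict start end_ (sum_according_to_range in_dict start end_)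

-- ===== LEMMAS AND PROOFS =====

-- splitting the sum of values over a Bool predicate on the items
theorem pv_sum_split (l : List (Int × Int)) (p : Int × Int → Bool) :
    (l.map Prod.snd).sum
      = ((l.filter p).map Prod.snd).sum + ((l.filter (fun x => !p x)).map Prod.snd).sum := by
  induction l with
  | nil => simp
  | cons x t ih =>
    cases hp : p x <;> simp [hp, ih] <;> ring

-- A's delete loop filters the items down to the keys outside the looped-over list
theorem pv_foldl_erase_items (L : List Int) (d : PySem.Dict Int Int) :
    (L.foldl (fun d i => if d.contains i then d.erase i else d) d).items
      = d.items.filter (fun p => decide (p.1 ∉ L)) := by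
  induction L generalizing d with
  | nil => simp
  | cons i t ih =>
    have hstep : (if d.contains i then d.erase i else d).items
        = d.items.filter (fun p => !(p.1 == i)) := by
      by_cases h : d.contains i = true
      · simp [h, PySem.Dict.erase]
      · have h' : ∀ p ∈ d.items, (!(p.1 == i)) = true := by
          intro p hp
          simp only [PySem.Dict.contains, List.any_eq_true] at h
          push Not at h
          simpa using h p hp
        simp [h, List.filter_eq_self.mpr h']
    simp only [List.foldl_cons, ih, hstep, List.filter_filter]
    apply List.filter_congr
    intro p _
    by_cases h1 : p.1 = i <;> by_cases h2 : p.1 ∈ t <;> simp [h1, h2]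

-- the body of A's range loop is an addition of a pointwise term
theorem pv_if_contains_add (d : PySem.Dict Int Int) (s i : Int) :
    (if d.contains i then s + d.getD i 0 else s) = s + ((d.get? i).getD 0) := by
  cases h : d.get? i with
  | none =>
    have : d.contains i = false := by
      simp only [PySem.Dict.contains, PySem.Dict.get?] at *
      cases hf : List.find? (fun p => p.1 == i) d.items with
      | none => simpa [List.any_eq_true, List.find?_eq_none] using (List.find?_eq_none.mp hf)
      | some q => simp [hf] at h
    simp [this]
  | some v =>
    have : d.contains i = true := by
      simp only [PySem.Dict.contains, PySem.Dict.get?] at *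
      cases hf : List.find? (fun p => p.1 == i) d.items with
      | none => simp [hf] at h
      | some q =>
        exact List.any_eq_true.mpr ⟨q, List.mem_of_find?_eq_some hf, by simpa using List.find?_some hf⟩
    simp [this, PySem.Dict.getD, h]

-- summing an "override at one absent key" function over a duplicate-free list
theorem pv_sum_indicator (l : List Int) (hnd : l.Nodup) (k v : Int) (f : Int → Int)
    (hf : f k = 0) :
    (l.map (fun i => if k = i then v else f i)).sum
      = (l.map f).sum + (if k ∈ l then v else 0) := by
  induction l with
  | nil => simp
  | cons x t ih =>
    have hnd' := (List.nodup_cons.mp hnd).2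
    by_cases h : k = x
    · subst h
      have hk : k ∉ t := (List.nodup_cons.mp hnd).1
      have : (t.map (fun i => if k = i then v else f i)) = t.map f := by
        apply List.map_congr_left
        intro i hi
        have : k ≠ i := fun he => hk (he ▸ hi)
        simp [this]
      simp [this, hf]
      ring
    · simp [h, ih hnd']
      by_cases hm : k ∈ t <;> · simp [hm]; try ring

-- the range-probing sum equals the filtered-items sum, for duplicate-free keys
theorem pv_range_sum (l : List (Int × Int)) (hnd : (l.map Prod.fst).Nodup) (a b : Int) :
    ((PySem.List.pyRange a b 1).map (fun i => ((PySem.Dict.mk l).get? i).getD 0)).sum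
      = ((l.filter (fun p => decide (a ≤ p.1) && decide (p.1 < b))).map Prod.snd).sum := by
  induction l with
  | nil => simp [PySem.Dict.get?]
  | cons x t ih =>
    rw [List.map_cons] at hnd
    obtain ⟨hk, hnd'⟩ := List.nodup_cons.mp hnd
    have hget : ∀ i, ((PySem.Dict.mk (x :: t)).get? i).getD 0
        = (fun i => if x.1 = i then x.2 else ((PySem.Dict.mk t).get? i).getD 0) i := by
      intro i
      rw [PySem.Dict.get?_mk_cons]
      by_cases h : x.1 = i <;> simp [h]
    have hft : ((PySem.Dict.mk t).get? x.1).getD 0 = 0 := by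
      have : (PySem.Dict.mk t).get? x.1 = none := by
        rw [PySem.Dict.get?_eq_none_iff_not_mem_keys]
        simpa [PySem.Dict.keys] using hk
      simp [this]
    calc ((PySem.List.pyRange a b 1).map (fun i => ((PySem.Dict.mk (x :: t)).get? i).getD 0)).sum
        = ((PySem.List.pyRange a b 1).map
            (fun i => if x.1 = i then x.2 else ((PySem.Dict.mk t).get? i).getD 0)).sum := by
          rw [List.map_congr_left (fun i _ => hget i)]
      _ = ((PySem.List.pyRange a b 1).map (fun i => ((PySem.Dict.mk t).get? i).getD 0)).sum
            + (if x.1 ∈ PySem.List.pyRange a b 1 then x.2 else 0) := by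
          exact pv_sum_indicator _ (PySem.List.nodup_pyRange_one a b) x.1 x.2 _ hft
      _ = ((t.filter (fun p => decide (a ≤ p.1) && decide (p.1 < b))).map Prod.snd).sum
            + (if x.1 ∈ PySem.List.pyRange a b 1 then x.2 else 0) := by rw [ih hnd']
      _ = (((x :: t).filter (fun p => decide (a ≤ p.1) && decide (p.1 < b))).map Prod.snd).sum := by
          rw [List.filter_cons]
          by_cases h : a ≤ x.1 ∧ x.1 < b
          · simp [h.1, h.2, PySem.List.mem_pyRange_one.mpr h]
            ring
          · have : x.1 ∉ PySem.List.pyRange a b 1 := fun hm =>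
              h (PySem.List.mem_pyRange_one.mp hm)
            rcases not_and_or.mp h with h' | h' <;> simp [this, h']

-- ===== VERDICT (by name: the statement is the Claim_ definition above) =====
theorem sum_according_to_range_spec : Claim_equal_sum_according_to_range := by
  intro in_dict start end_ _
  unfold Spec_sum_according_to_range sum_according_to_range sum_according_to_range_alt
  have hnd : ((PySem.Dict.ofList in_dict).items.map Prod.fst).Nodup := by
    simpa [PySem.Dict.keys] using PySem.Dict.nodup_keys_ofList (κ := Int) (ν := Int) in_dict
  cases end_ with
  | none =>
    dsimp only
    simp only [PySem.Dict.values, pv_foldl_erase_items]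
    rw [PySem.List.foldl_add _ (fun v => v) 0]
    simp only [List.map_id', zero_add]
    rw [pv_sum_split ((PySem.Dict.ofList in_dict).items)
        (fun p => decide (0 ≤ p.1) && decide (p.1 < start))]
    have hpred : ∀ p : Int × Int,
        (fun p : Int × Int => !(decide (0 ≤ p.1) && decide (p.1 < start))) p
          = (fun p : Int × Int => decide (p.1 ∉ PySem.List.pyRange 0 start 1)) p := by
      intro p
      by_cases h : p.1 ∈ PySem.List.pyRange 0 start 1
      · have := PySem.List.mem_pyRange_one.mp h
        simp [h, this.1, this.2]
      · have := fun h1 h2 => h (PySem.List.mem_pyRange_one.mpr ⟨h1, h2⟩)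
        by_cases h1 : 0 ≤ p.1 <;> by_cases h2 : p.1 < start <;>
          simp [h, h1, h2] at this ⊢
    rw [List.filter_congr (fun p _ => hpred p)]
    ring
  | some e =>
    dsimp only
    have hbody : (fun (s i : Int) =>
        if (PySem.Dict.ofList in_dict).contains i then s + (PySem.Dict.ofList in_dict).getD i 0 else s)
        = fun s i => s + (((PySem.Dict.ofList in_dict).get? i).getD 0) := by
      funext s i; exact pv_if_contains_add _ s i
    rw [hbody, PySem.List.foldl_add, zero_add]
    exact pv_range_sum (PySem.Dict.ofList in_dict).items hnd start e
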